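-- pv_equiv track=rewrite | github.com/rokurosatp/nlelement | coreference_handle.py | __comp_reference_tuple4__
-- ===== SOURCE A (Python) =====
-- def __comp_reference_tuple4__(left, right):
--     for i in [0, 1, 2, 3]:
--         if left[i] > right[i]:
--             return -1
--         elif left[i] < right[i]:
--             return 1
--         else:
--             pass
--     return 0
-- ===== SOURCE B (Python) =====
-- def __comp_reference_tuple4__(left, right):
--     u = (right[0], right[1], right[2], right[3])
--     t = (left[0], left[1], left[2], left[3])
--     return (u > t) - (u < t)
-- ===== Notes on version B (the rewrite author's own statement) =====
-- stated objective: idiomatic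
-- what changed: Replaces the explicit index loop with early returns by building two 4-tuples and returning (right_tuple > left_tuple) - (right_tuple < left_tuple) via Python's lexicographic tuple comparison.
import Mathlib
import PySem

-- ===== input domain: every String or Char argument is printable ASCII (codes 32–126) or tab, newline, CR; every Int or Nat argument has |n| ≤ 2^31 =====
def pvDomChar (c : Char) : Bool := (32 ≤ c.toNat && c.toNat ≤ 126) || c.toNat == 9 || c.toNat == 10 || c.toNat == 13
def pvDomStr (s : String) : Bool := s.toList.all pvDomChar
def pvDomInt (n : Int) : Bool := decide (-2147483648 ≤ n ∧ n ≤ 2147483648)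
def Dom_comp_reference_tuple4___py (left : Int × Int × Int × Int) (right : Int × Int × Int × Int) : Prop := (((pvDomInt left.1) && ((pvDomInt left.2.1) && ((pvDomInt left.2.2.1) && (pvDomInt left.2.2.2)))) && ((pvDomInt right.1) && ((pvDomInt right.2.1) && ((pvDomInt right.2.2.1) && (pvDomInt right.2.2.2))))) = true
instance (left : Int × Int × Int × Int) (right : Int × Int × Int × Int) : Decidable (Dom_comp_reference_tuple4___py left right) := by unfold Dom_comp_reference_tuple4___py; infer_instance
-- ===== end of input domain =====

-- B replaces A's index loop with early returns by one lexicographic 4-tuple comparison (idiomatic, same cost).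

-- ===== PORT A =====
-- tuple indexing left[i] for i in 0..3 (exact for these in-range indices)
def pvTup4Idx (t : Int × Int × Int × Int) : Nat → Int
  | 0 => t.1
  | 1 => t.2.1
  | 2 => t.2.2.1
  | _ => t.2.2.2

-- the 'for i in [0,1,2,3]' loop with its early returns, as structural recursion over the index list
def pvCompLoopA (left right : Int × Int × Int × Int) : List Nat → Int
  | [] => 0
  | i :: rest =>
    if pvTup4Idx left i > pvTup4Idx right i then -1
    else if pvTup4Idx left i < pvTup4Idx right i then 1
    else pvCompLoopA left right rest

def comp_reference_tuple4___py (left : Int × Int × Int × Int) (right : Int × Int × Int × Int) : Int :=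
  pvCompLoopA left right [0, 1, 2, 3]

-- ===== PORT B =====
-- Python's lexicographic '<' on 4-tuples of ints: compare by __eq__ then __lt__ componentwise
def pvTup4Lt (u t : Int × Int × Int × Int) : Bool :=
  u.1 < t.1 || (u.1 == t.1 && (u.2.1 < t.2.1 || (u.2.1 == t.2.1 &&
    (u.2.2.1 < t.2.2.1 || (u.2.2.1 == t.2.2.1 && u.2.2.2 < t.2.2.2)))))

def comp_reference_tuple4___py_alt (left : Int × Int × Int × Int) (right : Int × Int × Int × Int) : Int :=
  let u : Int × Int × Int × Int := (right.1, right.2.1, right.2.2.1, right.2.2.2)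
  let t : Int × Int × Int × Int := (left.1, left.2.1, left.2.2.1, left.2.2.2)
  (if pvTup4Lt t u then (1 : Int) else 0) - (if pvTup4Lt u t then (1 : Int) else 0)

-- ===== PRECONDITION & SPEC =====
def Spec_comp_reference_tuple4___py (left : Int × Int × Int × Int) (right : Int × Int × Int × Int) (out : Int) : Prop := out = comp_reference_tuple4___py_alt left right
instance (left : Int × Int × Int × Int) (right : Int × Int × Int × Int) (out : Int) : Decidable (Spec_comp_reference_tuple4___py left right out) := by unfold Spec_comp_reference_tuple4___py; infer_instance

-- ===== CLAIM (what is proved, stated in full; the proofs are below) =====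
def Claim_equal_comp_reference_tuple4___py : Prop := ∀ (left : Int × Int × Int × Int) (right : Int × Int × Int × Int), Dom_comp_reference_tuple4___py left right → Spec_comp_reference_tuple4___py left right (comp_reference_tuple4___py left right)

-- ===== LEMMAS AND PROOFS =====

-- ===== VERDICT (by name: the statement is the Claim_ definition above) =====
theorem comp_reference_tuple4___py_spec : Claim_equal_comp_reference_tuple4___py := by
  intro left right _
  obtain ⟨a, b, c, d⟩ := left
  obtain ⟨a', b', c', d'⟩ := right
  show _ = _
  simp only [comp_reference_tuple4___py, comp_reference_tuple4___py_alt,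
    pvCompLoopA, pvTup4Idx, pvTup4Lt, Bool.or_eq_true, Bool.and_eq_true,
    beq_iff_eq, decide_eq_true_eq]
  split_ifs <;> omega
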